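-- pv_equiv track=rewrite | github.com/tomer-mil/Extended_Intro_to_CS | HW_5/drafts/q_5_d.py | prefix_suffix_overlap_hash1
-- ===== SOURCE A (Python) =====
-- class Dict:
--     def __init__(self, m, hash_func=hash):
--         """ initial hash table, m empty entries """
--         self.table = [[] for i in range(m)]
--         self.hash_mod = lambda x: hash_func(x) % m
--
--     def __repr__(self):
--         L = [self.table[i] for i in range(len(self.table))]
--         return "".join([str(i) + " " + str(L[i]) + "\n" for i in range(len(self.table))])
--
--     def insert(self, key, value):
--         """ insert key,value into table
--             Allow repetitions of keys """
--         i = self.hash_mod(key)  # hash on key only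
--         item = [key, value]  # pack into one item
--         self.table[i].append(item)
--
--     def find(self, key):
--
--         result = []
--
--         i = self.hash_mod(key)
--         cell = self.table[i]
--
--         for elem in cell:
--             if key == elem[0]:
--                 result.append(elem[1])
--
--         return result
--
-- def prefix_suffix_overlap_hash1(lst, k):
--
--     result = []
--     d = Dict(len(lst))
--
--     for i in range(len(lst)): # n
--         prefix = lst[i][:k]
--         d.insert(prefix, i)
--
--     for j in range(len(lst)):
--         suffix = lst[j][-k:]
--         for index in d.find(suffix):
--             if j != index:
--                 result.append((index, j))
--
--     return result
-- ===== SOURCE B (Python) =====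
-- def prefix_suffix_overlap_hash1(lst, k):
--     result = []
--     n = len(lst)
--     for j in range(n):
--         suffix = lst[j][-k:]
--         for i in range(n):
--             if i != j and lst[i][:k] == suffix:
--                 result.append((i, j))
--     return result
-- ===== Notes on version B (the rewrite author's own statement) =====
-- stated objective: simpler
-- what changed: Replaces the hand-rolled chained hash table (build prefix index, then look up each suffix) with a direct all-pairs nested scan comparing lst[i][:k] to lst[j][-k:].
import Mathlib
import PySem

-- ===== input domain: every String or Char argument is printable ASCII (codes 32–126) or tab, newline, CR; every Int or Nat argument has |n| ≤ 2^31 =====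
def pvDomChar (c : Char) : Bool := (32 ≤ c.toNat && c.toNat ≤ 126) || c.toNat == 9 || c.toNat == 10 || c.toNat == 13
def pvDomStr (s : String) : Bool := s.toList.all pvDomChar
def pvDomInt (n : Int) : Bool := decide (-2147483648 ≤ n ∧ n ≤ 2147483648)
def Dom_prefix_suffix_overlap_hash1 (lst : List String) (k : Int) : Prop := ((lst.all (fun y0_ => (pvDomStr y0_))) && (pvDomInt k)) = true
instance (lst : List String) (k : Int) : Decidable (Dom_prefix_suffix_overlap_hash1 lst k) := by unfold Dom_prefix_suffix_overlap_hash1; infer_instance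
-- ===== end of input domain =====

-- ===== PORT A =====
-- B replaces A's hand-rolled chained hash table with a direct all-pairs nested scan (objective: simpler).
-- pvHash stands in for Python's seed-dependent hash(); A's return value is independent of the hash
-- function, because find filters its cell by key equality and cells preserve global insertion order.
def pvHash (s : List Char) : Nat := s.foldl (fun a c => a * 31 + c.toNat) 0

-- Dict.insert: append [key, value] to the cell at hash(key) % m
def pvInsert (m : Nat) (t : List (List (List Char × Int))) (key : List Char) (v : Int) :
    List (List (List Char × Int)) :=
  t.set (pvHash key % m) (t.getD (pvHash key % m) [] ++ [(key, v)])

-- Dict.find: scan the cell at hash(key) % m, collecting values whose key matches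
def pvFind (m : Nat) (t : List (List (List Char × Int))) (key : List Char) : List Int :=
  (t.getD (pvHash key % m) []).foldl (fun r e => if key = e.1 then r ++ [e.2] else r) []

def prefix_suffix_overlap_hash1 (lst : List String) (k : Int) : List (Int × Int) :=
  let n := lst.length
  let t := (List.range n).foldl
    (fun tb i => pvInsert n tb (PySem.List.slice (lst.getD i "").toList none (some k)) (Int.ofNat i))
    (List.replicate n [])
  (List.range n).foldl
    (fun r j =>
      let suffix := PySem.List.slice (lst.getD j "").toList (some (-k)) none
      (pvFind n t suffix).foldl
        (fun r idx => if (j : Int) ≠ idx then r ++ [(idx, (j : Int))] else r) r)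
    []

-- ===== PORT B =====
def prefix_suffix_overlap_hash1_alt (lst : List String) (k : Int) : List (Int × Int) :=
  let n := lst.length
  (List.range n).foldl
    (fun r j =>
      let suffix := PySem.List.slice (lst.getD j "").toList (some (-k)) none
      (List.range n).foldl
        (fun r i =>
          if i ≠ j ∧ PySem.List.slice (lst.getD i "").toList none (some k) = suffix
          then r ++ [((i : Int), (j : Int))] else r) r)
    []

-- ===== PRECONDITION & SPEC =====
def Spec_prefix_suffix_overlap_hash1 (lst : List String) (k : Int) (out : List (Int × Int)) : Prop := out = prefix_suffix_overlap_hash1_alt lst k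
instance (lst : List String) (k : Int) (out : List (Int × Int)) : Decidable (Spec_prefix_suffix_overlap_hash1 lst k out) := by unfold Spec_prefix_suffix_overlap_hash1; infer_instance

-- ===== CLAIM (what is proved, stated in full; the proofs are below) =====
def Claim_equal_prefix_suffix_overlap_hash1 : Prop := ∀ (lst : List String) (k : Int), Dom_prefix_suffix_overlap_hash1 lst k → Spec_prefix_suffix_overlap_hash1 lst k (prefix_suffix_overlap_hash1 lst k)

-- ===== LEMMAS AND PROOFS =====

-- ===== VERDICT (by name: the statement is the Claim_ definition above) =====
-- length is preserved by insert
theorem pvInsert_length (m : Nat) (t : List (List (List Char × Int))) (key : List Char) (v : Int) :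
    (pvInsert m t key v).length = t.length := by
  simp [pvInsert]

-- one insert step seen through find
theorem pvFind_insert (m : Nat) (hm : 0 < m) (t : List (List (List Char × Int)))
    (ht : t.length = m) (key key' : List Char) (v : Int) :
    pvFind m (pvInsert m t key v) key'
      = pvFind m t key' ++ (if key' = key then [v] else []) := by
  unfold pvFind pvInsert
  have hk : pvHash key % m < t.length := by rw [ht]; exact Nat.mod_lt _ hm
  by_cases hc : pvHash key' % m = pvHash key % m
  · rw [hc, List.getD_eq_getElem?_getD, List.getElem?_set_self (by simpa using hk)]
    have : (t.set (pvHash key % m) (t.getD (pvHash key % m) [] ++ [(key, v)]))[pvHash key % m]?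
        = some (t.getD (pvHash key % m) [] ++ [(key, v)]) := by
      simp [List.getElem?_set_self hk]
    simp only [List.getD_eq_getElem?_getD] at *
    simp only [Option.getD_some]
    rw [List.foldl_append]
    simp only [List.foldl_cons, List.foldl_nil]
    by_cases hkk : key' = key
    · simp [hkk]
    · simp [hkk]
  · rw [List.getD_eq_getElem?_getD, List.getElem?_set_ne (by omega)]
    by_cases hkk : key' = key
    · exact absurd (by rw [hkk]) hc
    · simp [hkk, List.getD_eq_getElem?_getD]

-- find after folding a sequence of inserts = filter of the inserted pairs
theorem pvFind_foldl_insert (m : Nat) (hm : 0 < m) (p : Nat → List Char)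
    (l : List Nat) (t : List (List (List Char × Int))) (ht : t.length = m) (key : List Char) :
    pvFind m (l.foldl (fun tb i => pvInsert m tb (p i) (Int.ofNat i)) t) key
      = pvFind m t key ++ (l.filter (fun i => key = p i)).map Int.ofNat := by
  induction l generalizing t with
  | nil => simp
  | cons x xs ih =>
    simp only [List.foldl_cons]
    rw [ih _ (by rw [pvInsert_length, ht])]
    rw [pvFind_insert m hm t ht (p x) key (Int.ofNat x)]
    by_cases h : key = p x <;> simp [h]

theorem pvFind_replicate (m : Nat) (key : List Char) :
    pvFind m (List.replicate m ([] : List (List Char × Int))) key = [] := by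
  unfold pvFind
  rcases Nat.eq_zero_or_pos m with h | h
  · simp [h]
  · rw [List.getD_eq_getElem?_getD, List.getElem?_replicate_of_lt (Nat.mod_lt _ h)]
    simp

theorem prefix_suffix_overlap_hash1_spec : Claim_equal_prefix_suffix_overlap_hash1 := by
  intro lst k _
  unfold Spec_prefix_suffix_overlap_hash1 prefix_suffix_overlap_hash1 prefix_suffix_overlap_hash1_alt
  rcases Nat.eq_zero_or_pos lst.length with hn | hn
  · simp [hn]
  · apply PySem.List.foldl_congr_mem
    intro r j hj
    dsimp only
    rw [pvFind_foldl_insert lst.length hn _ _ _ (by simp) _, pvFind_replicate]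
    rw [List.nil_append]
    set suffix := PySem.List.slice (lst.getD j "").toList (some (-k)) none with hs
    set pref : Nat → List Char := fun i => PySem.List.slice (lst.getD i "").toList none (some k) with hp
    have hA := PySem.List.foldl_append_if (fun idx : Int => decide ((j : Int) ≠ idx))
      (fun idx : Int => (idx, (j : Int)))
      (((List.range lst.length).filter (fun i => decide (suffix = pref i))).map Int.ofNat) r
    have hB := PySem.List.foldl_append_if (fun i : Nat => decide (i ≠ j ∧ pref i = suffix))
      (fun i : Nat => ((i : Int), (j : Int))) (List.range lst.length) r
    simp only [decide_eq_true_eq] at hA hB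
    rw [hA, hB]
    congr 1
    rw [List.filter_map, List.map_map, List.filter_filter]
    have hc : ∀ x ∈ List.range lst.length,
        (((fun idx : Int => decide ((j : Int) ≠ idx)) ∘ Int.ofNat) x
          && (fun i => decide (suffix = pref i)) x)
          = decide (x ≠ j ∧ pref x = suffix) := by
      intro x _
      rw [Function.comp_apply, ← Bool.decide_and]
      apply decide_eq_decide.mpr
      constructor
      · rintro ⟨h1, h2⟩
        exact ⟨fun e => h1 (by subst e; rfl), h2.symm⟩
      · rintro ⟨h1, h2⟩
        exact ⟨fun e => h1 (by simpa using e.symm), h2.symm⟩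
    rw [List.filter_congr hc]
    rfl
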